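-- pv_equiv track=rewrite | github.com/Krytog/PoemicMnemonicPhrases | src/mnemonic_generator.py | get_mnemonic_beautiful
-- ===== SOURCE A (Python) =====
-- def get_mnemonic_beautiful(mnemonic):
--     output = ""
--     for index, word in enumerate(list(mnemonic.split(' '))):
--         output += word
--         if index % 4 == 3:
--             output += "\n"
--         else:
--             output += " "
--     output = output[:-1]
--     return output
-- ===== SOURCE B (Python) =====
-- def get_mnemonic_beautiful(mnemonic):
--     words = mnemonic.split(' ')
--     lines = []
--     while words:
--         lines.append(' '.join(words[:4]))
--         words = words[4:]
--     return '\n'.join(lines)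
-- ===== Notes on version B (the rewrite author's own statement) =====
-- stated objective: idiomatic
-- what changed: Replaces A's per-word separator accumulation followed by trimming the trailing separator with a chunk-then-join decomposition: split into groups of 4 words, join each group with spaces, join groups with newlines.
import Mathlib
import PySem

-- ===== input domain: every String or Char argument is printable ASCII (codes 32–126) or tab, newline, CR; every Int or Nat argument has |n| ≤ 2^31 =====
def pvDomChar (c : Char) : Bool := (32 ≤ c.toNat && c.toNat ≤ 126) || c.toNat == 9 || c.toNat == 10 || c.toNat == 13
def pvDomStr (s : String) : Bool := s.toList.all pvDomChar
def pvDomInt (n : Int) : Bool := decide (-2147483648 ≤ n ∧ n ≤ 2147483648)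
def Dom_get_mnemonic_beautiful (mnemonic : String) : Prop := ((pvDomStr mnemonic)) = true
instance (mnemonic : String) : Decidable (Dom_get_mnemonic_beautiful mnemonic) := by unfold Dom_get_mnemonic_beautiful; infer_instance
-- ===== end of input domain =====

-- B replaces A's per-word separator accumulation + trailing trim with a chunk-of-4-then-join decomposition (same cost, more idiomatic).

-- ===== PORT A =====
def get_mnemonic_beautiful (mnemonic : String) : String :=
  let output : String :=
    (PySem.List.enumerate ((PySem.Str.split? mnemonic " ").getD []) 0).foldl
      (fun (output : String) iw =>
        let output := output ++ iw.2
        if PySem.Int.mod iw.1 4 == 3 then output ++ "\n" else output ++ " ") ""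
  PySem.Str.slice output none (some (-1))

-- ===== PORT B =====
-- Source B's while loop consuming the word list four words at a time, as the corresponding structural recursion
def pvLinesB (words : List String) : List String :=
  match words with
  | [] => []
  | w :: rest =>
      PySem.Str.join " " (PySem.List.slice (w :: rest) none (some 4)) ::
        pvLinesB (PySem.List.slice (w :: rest) (some 4) none)
termination_by words.length
decreasing_by
  simp [PySem.List.slice_some_none, PySem.List.clampIdx]

def get_mnemonic_beautiful_alt (mnemonic : String) : String :=
  PySem.Str.join "\n" (pvLinesB ((PySem.Str.split? mnemonic " ").getD []))

-- ===== PRECONDITION & SPEC =====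
def Spec_get_mnemonic_beautiful (mnemonic : String) (out : String) : Prop := out = get_mnemonic_beautiful_alt mnemonic
instance (mnemonic : String) (out : String) : Decidable (Spec_get_mnemonic_beautiful mnemonic out) := by unfold Spec_get_mnemonic_beautiful; infer_instance

-- ===== CLAIM (what is proved, stated in full; the proofs are below) =====
def Claim_equal_get_mnemonic_beautiful : Prop := ∀ (mnemonic : String), Dom_get_mnemonic_beautiful mnemonic → Spec_get_mnemonic_beautiful mnemonic (get_mnemonic_beautiful mnemonic)

-- ===== LEMMAS AND PROOFS =====

-- character-level shape of A's accumulated output: each word followed by its separator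
def pvBodyA : List (List Char) → List Char
  | [] => []
  | [a] => a ++ [' ']
  | [a, b] => a ++ [' '] ++ b ++ [' ']
  | [a, b, c] => a ++ [' '] ++ b ++ [' '] ++ c ++ [' ']
  | a :: b :: c :: d :: rest =>
      a ++ [' '] ++ b ++ [' '] ++ c ++ [' '] ++ d ++ ['\n'] ++ pvBodyA rest

theorem pvBodyA_ne_nil (css : List (List Char)) (h : css ≠ []) : pvBodyA css ≠ [] := by
  match css with
  | [] => exact absurd rfl h
  | [a] => simp [pvBodyA]
  | [a, b] => simp [pvBodyA]
  | [a, b, c] => simp [pvBodyA]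
  | a :: b :: c :: d :: rest => simp [pvBodyA]

theorem pv_mod_eq (a : Int) : PySem.Int.mod a 4 = a % 4 := by
  simp [PySem.Int.mod, Int.fmod_eq_emod]

theorem pv_foldA (ws : List String) (k : Int) (acc : String) (hk : k % 4 = 0) :
    ((PySem.List.enumerate ws k).foldl
      (fun (output : String) iw =>
        let output := output ++ iw.2
        if PySem.Int.mod iw.1 4 == 3 then output ++ "\n" else output ++ " ") acc).toList
    = acc.toList ++ pvBodyA (ws.map String.toList) := by
  match ws with
  | [] => simp [pvBodyA]
  | [a] =>
    have c0 : ¬ (k % 4 = 3) := by omega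
    simp [PySem.List.enumerate_cons, pvBodyA, c0]
  | [a, b] =>
    have c0 : ¬ (k % 4 = 3) := by omega
    have c1 : ¬ ((k + 1) % 4 = 3) := by omega
    simp [PySem.List.enumerate_cons, pvBodyA, c0, c1]
  | [a, b, c] =>
    have c0 : ¬ (k % 4 = 3) := by omega
    have c1 : ¬ ((k + 1) % 4 = 3) := by omega
    have c2 : ¬ ((k + 1 + 1) % 4 = 3) := by omega
    simp [PySem.List.enumerate_cons, pvBodyA, c0, c1, c2]
  | a :: b :: c :: d :: rest =>
    have c0 : ¬ (k % 4 = 3) := by omega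
    have c1 : ¬ ((k + 1) % 4 = 3) := by omega
    have c2 : ¬ ((k + 1 + 1) % 4 = 3) := by omega
    have c3 : (k + 1 + 1 + 1) % 4 = 3 := by omega
    have hk4 : (k + 1 + 1 + 1 + 1) % 4 = 0 := by omega
    have ih := pv_foldA rest (k + 1 + 1 + 1 + 1)
      (acc ++ a ++ " " ++ b ++ " " ++ c ++ " " ++ d ++ "\n") hk4
    simp only [PySem.List.enumerate_cons, List.foldl_cons, pv_mod_eq, beq_iff_eq,
      c0, c1, c2, c3, if_false, if_pos] at ih ⊢
    rw [ih]
    simp [pvBodyA]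
termination_by ws.length

theorem pv_main (ws : List String) :
    (pvBodyA (ws.map String.toList)).dropLast
    = (PySem.Str.join "\n" (pvLinesB ws)).toList := by
  match ws with
  | [] => simp [pvBodyA, pvLinesB, PySem.Str.toList_join, PySem.Chars.join, List.intercalate]
  | [a] =>
    simp [pvBodyA, pvLinesB, PySem.List.slice, PySem.Str.toList_join,
      PySem.Chars.join_singleton]
  | [a, b] =>
    simp [pvBodyA, pvLinesB, PySem.List.slice, PySem.Str.toList_join,
      PySem.Chars.join_singleton, PySem.Chars.join_cons_cons,
      List.dropLast_cons_of_ne_nil]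
  | [a, b, c] =>
    simp [pvBodyA, pvLinesB, PySem.List.slice, PySem.Str.toList_join,
      PySem.Chars.join_singleton, PySem.Chars.join_cons_cons,
      List.dropLast_cons_of_ne_nil]
  | [a, b, c, d] =>
    simp [pvBodyA, pvLinesB, PySem.List.slice, PySem.Str.toList_join,
      PySem.Chars.join_singleton, PySem.Chars.join_cons_cons,
      List.dropLast_cons_of_ne_nil]
  | a :: b :: c :: d :: e :: rest =>
    have ih := pv_main (e :: rest)
    have hslice4 : PySem.List.slice (a :: b :: c :: d :: e :: rest) (some 4) none = e :: rest := by
      simp [PySem.List.slice_some_none, PySem.List.clampIdx]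
    have hslice04 : PySem.List.slice (a :: b :: c :: d :: e :: rest) none (some 4) = [a, b, c, d] := by
      simp [PySem.List.slice, PySem.List.clampIdx]
    have hne : pvBodyA ((e :: rest).map String.toList) ≠ [] :=
      pvBodyA_ne_nil _ (by simp)
    obtain ⟨l, ls, hl⟩ : ∃ l ls, pvLinesB (e :: rest) = l :: ls := by
      rw [pvLinesB]; exact ⟨_, _, rfl⟩
    rw [hl] at ih
    rw [pvLinesB, hslice4, hslice04, hl]
    simp only [List.map_cons, pvBodyA, PySem.Str.toList_join, PySem.Chars.join_cons_cons,
      List.map_cons] at ih ⊢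
    simp only [List.append_assoc, List.cons_append, List.nil_append] at ih ⊢
    have hne' : pvBodyA (e.toList :: rest.map String.toList) ≠ [] := by simpa using hne
    rw [← ih]
    simp [List.dropLast_append_of_ne_nil, List.dropLast_cons_of_ne_nil, hne']
termination_by ws.length

-- ===== VERDICT (by name: the statement is the Claim_ definition above) =====
theorem get_mnemonic_beautiful_spec : Claim_equal_get_mnemonic_beautiful := by
  intro m _
  unfold Spec_get_mnemonic_beautiful get_mnemonic_beautiful get_mnemonic_beautiful_alt
  rw [← String.toList_inj]
  rw [PySem.Str.slice_to_neg_one]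
  rw [pv_foldA _ 0 "" (by decide)]
  simpa using pv_main ((PySem.Str.split? m " ").getD [])
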